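-- pv_equiv track=rewrite | github.com/ruimiguelforte/aoc2020 | problems/day24.py | get_next_black_tiles
-- ===== SOURCE A (Python) =====
-- def count_adjacent_black_tiles(black_tiles, tile, dmap):
--     adjacent = 0
--     for ne_add, se_add in dmap.values():
--         if (tile[0] + ne_add, tile[1] + se_add) in black_tiles:
--             adjacent += 1
--     return adjacent
--
-- def get_next_black_tiles(black_tiles, min_ne, max_ne, min_se, max_se, dmap):
--     new_black_tiles = set()
--     for ne in range(min_ne - 1, max_ne + 2):
--         for se in range(min_se - 1, max_se + 2):
--             tile = (ne, se)
--             adjacent = count_adjacent_black_tiles(black_tiles, tile, dmap)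
--             if tile in black_tiles:
--                 if 1 <= adjacent <= 2:
--                     new_black_tiles.add(tile)
--             else:
--                 if adjacent == 2:
--                     new_black_tiles.add(tile)
--     return new_black_tiles, min_ne - 1, max_ne + 1, min_se - 1, max_se + 1
-- ===== SOURCE B (Python) =====
-- def get_next_black_tiles(black_tiles, min_ne, max_ne, min_se, max_se, dmap):
--     # Sparse scatter: each black tile contributes 1 to the neighbour count of
--     # the six tiles it touches; the per-cell scan over dmap disappears and the
--     # new generation is a single comprehension filtering the grid cells.
--     blacks = set(black_tiles)
--     offsets = list(dmap.values())
--     touched = [(ne - da, se - db) for ne, se in blacks for da, db in offsets]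
--     counts = {}
--     for key in touched:
--         counts[key] = counts.get(key, 0) + 1
--     new_black_tiles = {
--         (ne, se)
--         for ne in range(min_ne - 1, max_ne + 2)
--         for se in range(min_se - 1, max_se + 2)
--         if counts.get((ne, se), 0) == 2
--         or (counts.get((ne, se), 0) == 1 and (ne, se) in blacks)
--     }
--     return new_black_tiles, min_ne - 1, max_ne + 1, min_se - 1, max_se + 1
-- ===== Notes on version B (the rewrite author's own statement) =====
-- stated objective: alternative
-- what changed: A gathers: for every cell of the enlarged box it re-scans the six offsets with a membership test; B scatters: one pass over the (deduplicated) black tiles builds a flat list of touched neighbours, a counting dict tallies it, and the next generation is a single comprehension filtering the grid cells by their tallied count.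
import Mathlib
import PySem

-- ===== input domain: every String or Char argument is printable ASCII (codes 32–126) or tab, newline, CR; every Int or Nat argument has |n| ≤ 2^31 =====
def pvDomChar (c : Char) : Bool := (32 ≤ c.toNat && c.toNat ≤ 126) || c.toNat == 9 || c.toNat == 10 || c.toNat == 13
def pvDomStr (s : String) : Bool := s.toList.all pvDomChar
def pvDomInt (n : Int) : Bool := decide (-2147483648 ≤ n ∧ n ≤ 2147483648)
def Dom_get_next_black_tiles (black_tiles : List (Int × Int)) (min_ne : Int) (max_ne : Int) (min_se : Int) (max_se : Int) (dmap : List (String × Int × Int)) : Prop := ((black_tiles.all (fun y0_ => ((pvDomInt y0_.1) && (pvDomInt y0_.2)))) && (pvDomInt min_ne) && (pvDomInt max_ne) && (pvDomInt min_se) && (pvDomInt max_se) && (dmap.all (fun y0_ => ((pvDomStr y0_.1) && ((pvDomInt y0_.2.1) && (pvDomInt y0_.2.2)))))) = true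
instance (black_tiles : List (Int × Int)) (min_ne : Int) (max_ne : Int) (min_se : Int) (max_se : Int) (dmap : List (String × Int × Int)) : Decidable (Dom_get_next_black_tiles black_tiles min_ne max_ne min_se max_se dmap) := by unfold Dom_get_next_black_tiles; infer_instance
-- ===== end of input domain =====

-- B replaces A's per-cell gather (re-scanning the six offsets with a membership
-- test for every cell of the box) by a scatter pass: the black tiles emit a flat
-- list of touched neighbours, a dict tallies it, and the next generation is one
-- filter over the grid cells (alternative algorithm, same results).

-- ===== PORT A =====
def count_adjacent_black_tiles (black_tiles : List (Int × Int)) (tile : Int × Int) (dmap : PySem.Dict String (Int × Int)) : Int :=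
  (PySem.Dict.values dmap).foldl
    (fun adjacent d =>
      if black_tiles.contains (tile.1 + d.1, tile.2 + d.2) then adjacent + 1 else adjacent) 0

def get_next_black_tiles (black_tiles : List (Int × Int)) (min_ne : Int) (max_ne : Int) (min_se : Int) (max_se : Int) (dmap : List (String × Int × Int)) : (List (Int × Int)) × Int × Int × Int × Int :=
  let dm : PySem.Dict String (Int × Int) := PySem.Dict.ofList dmap
  let s : PySem.Set (Int × Int) :=
    (PySem.List.pyRange (min_ne - 1) (max_ne + 2) 1).foldl (fun acc ne =>
      (PySem.List.pyRange (min_se - 1) (max_se + 2) 1).foldl (fun acc se =>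
        let tile : Int × Int := (ne, se)
        let adjacent := count_adjacent_black_tiles black_tiles tile dm
        if black_tiles.contains tile then
          if 1 ≤ adjacent ∧ adjacent ≤ 2 then PySem.Set.add acc tile else acc
        else
          if adjacent = 2 then PySem.Set.add acc tile else acc) acc) PySem.Set.empty
  (s, min_ne - 1, max_ne + 1, min_se - 1, max_se + 1)

-- ===== PORT B =====
def get_next_black_tiles_alt (black_tiles : List (Int × Int)) (min_ne : Int) (max_ne : Int) (min_se : Int) (max_se : Int) (dmap : List (String × Int × Int)) : (List (Int × Int)) × Int × Int × Int × Int :=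
  let blacks : PySem.Set (Int × Int) := PySem.Set.ofList black_tiles
  let offsets : List (Int × Int) := PySem.Dict.values (PySem.Dict.ofList dmap)
  let touched : List (Int × Int) := blacks.flatMap (fun b => offsets.map (fun d => (b.1 - d.1, b.2 - d.2)))
  let counts : PySem.Dict (Int × Int) Int :=
    touched.foldl (fun c key => c.modify key 0 (· + 1)) PySem.Dict.empty
  let cells : List (Int × Int) :=
    (PySem.List.pyRange (min_ne - 1) (max_ne + 2) 1).flatMap (fun ne =>
      (PySem.List.pyRange (min_se - 1) (max_se + 2) 1).map (fun se => (ne, se)))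
  let new_black_tiles : PySem.Set (Int × Int) :=
    PySem.Set.ofList (cells.filter (fun t =>
      counts.getD t 0 == 2 || (counts.getD t 0 == 1 && PySem.Set.contains blacks t)))
  (new_black_tiles, min_ne - 1, max_ne + 1, min_se - 1, max_se + 1)

-- ===== PRECONDITION & SPEC =====
def Spec_get_next_black_tiles (black_tiles : List (Int × Int)) (min_ne : Int) (max_ne : Int) (min_se : Int) (max_se : Int) (dmap : List (String × Int × Int)) (out : (List (Int × Int)) × Int × Int × Int × Int) : Prop := out = get_next_black_tiles_alt black_tiles min_ne max_ne min_se max_se dmap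
instance (black_tiles : List (Int × Int)) (min_ne : Int) (max_ne : Int) (min_se : Int) (max_se : Int) (dmap : List (String × Int × Int)) (out : (List (Int × Int)) × Int × Int × Int × Int) : Decidable (Spec_get_next_black_tiles black_tiles min_ne max_ne min_se max_se dmap out) := by unfold Spec_get_next_black_tiles; infer_instance

-- ===== CLAIM (what is proved, stated in full; the proofs are below) =====
def Claim_equal_get_next_black_tiles : Prop := ∀ (black_tiles : List (Int × Int)) (min_ne : Int) (max_ne : Int) (min_se : Int) (max_se : Int) (dmap : List (String × Int × Int)), Dom_get_next_black_tiles black_tiles min_ne max_ne min_se max_se dmap → Spec_get_next_black_tiles black_tiles min_ne max_ne min_se max_se dmap (get_next_black_tiles black_tiles min_ne max_ne min_se max_se dmap)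

-- ===== LEMMAS AND PROOFS =====

-- set(xs) has the same membership test as xs
theorem pvContains_ofList (bs : List (Int × Int)) (x : Int × Int) :
    List.contains (PySem.Set.ofList bs) x = bs.contains x := by
  rw [Bool.eq_iff_iff]
  simp [PySem.Set.mem_ofList]

-- casting a 0/1 indicator sum from Nat to Int, indicator-wise
theorem pvCastSum (ds : List (Int × Int)) (c : Int × Int → Bool) :
    (((ds.map (fun d => if c d then (1 : Nat) else 0)).sum : Nat) : Int)
      = (ds.map (fun d => if c d then (1 : Int) else 0)).sum := by
  induction ds with
  | nil => simp
  | cons d ds ih =>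
    simp only [List.map_cons, List.sum_cons]
    by_cases h : c d <;> simp [h, ih]

-- double counting: sum over black tiles of matching offsets = sum over offsets of matching black tiles
theorem pvSwap (bs ds : List (Int × Int)) (t : Int × Int) :
    (bs.map (fun b => ds.countP (fun d => decide ((b.1 - d.1, b.2 - d.2) = t)))).sum
      = (ds.map (fun d => bs.countP (fun b => decide ((b.1 - d.1, b.2 - d.2) = t)))).sum := by
  induction bs with
  | nil => simp
  | cons b bs ih =>
    simp only [List.map_cons, List.sum_cons, ih]
    have hsplit : (ds.map (fun d => List.countP (fun b' => decide ((b'.1 - d.1, b'.2 - d.2) = t)) (b :: bs))).sum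
        = (ds.map (fun d => bs.countP (fun b' => decide ((b'.1 - d.1, b'.2 - d.2) = t))
            + (if (b.1 - d.1, b.2 - d.2) = t then (1 : Nat) else 0))).sum := by
      apply congrArg List.sum
      apply List.map_congr_left
      intro d _
      rw [List.countP_cons]
      by_cases h : (b.1 - d.1, b.2 - d.2) = t <;> simp [h]
    rw [hsplit, List.sum_map_add, PySem.List.sum_map_ite_one_zero_nat']
    omega

-- with distinct black tiles, the per-offset count is A's membership test
theorem pvCount_mem (bs : List (Int × Int)) (hnd : bs.Nodup) (d t : Int × Int) :
    bs.countP (fun b => decide ((b.1 - d.1, b.2 - d.2) = t))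
      = if bs.contains (t.1 + d.1, t.2 + d.2) then (1 : Nat) else 0 := by
  have hiff : ∀ b : Int × Int, ((b.1 - d.1, b.2 - d.2) = t) ↔ b = (t.1 + d.1, t.2 + d.2) := by
    intro b
    obtain ⟨x, y⟩ := b
    obtain ⟨u, v⟩ := t
    simp only [Prod.mk.injEq]
    constructor <;> intro h <;> omega
  induction bs with
  | nil => simp
  | cons b bs ih =>
    have hnd' : bs.Nodup := hnd.of_cons
    have hb' : b ∉ bs := (List.nodup_cons.mp hnd).1
    simp only [List.countP_cons, List.contains_cons]
    by_cases hb : b = (t.1 + d.1, t.2 + d.2)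
    · have h1 : decide ((b.1 - d.1, b.2 - d.2) = t) = true := by
        rw [decide_eq_true_iff, hiff]
        exact hb
      have h0 : List.countP (fun b => decide ((b.1 - d.1, b.2 - d.2) = t)) bs = 0 := by
        rw [List.countP_eq_zero]
        intro x hx hpx
        rw [decide_eq_true_iff, hiff] at hpx
        apply hb'
        rw [hb, ← hpx]
        exact hx
      have hbeq : ((t.1 + d.1, t.2 + d.2) == b) = true := by
        rw [beq_iff_eq, hb]
      simp [h1, h0, hbeq]
    · have h1 : decide ((b.1 - d.1, b.2 - d.2) = t) = false := by
        rw [decide_eq_false_iff_not, hiff]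
        exact hb
      have hbeq : ((t.1 + d.1, t.2 + d.2) == b) = false := by
        rw [beq_eq_false_iff_ne]
        exact fun h => hb h.symm
      simp only [h1, hbeq, Bool.false_or]
      exact ih hnd'

-- A's counting loop as an indicator sum over the offsets
theorem pvCountAdj_eq_sum (bs : List (Int × Int)) (t : Int × Int) (dm : PySem.Dict String (Int × Int)) :
    count_adjacent_black_tiles bs t dm
      = ((PySem.Dict.values dm).map (fun d => if bs.contains (t.1 + d.1, t.2 + d.2) then (1 : Int) else 0)).sum := by
  unfold count_adjacent_black_tiles
  suffices h : ∀ (ds : List (Int × Int)) (a : Int),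
      ds.foldl (fun adjacent d => if bs.contains (t.1 + d.1, t.2 + d.2) then adjacent + 1 else adjacent) a
        = a + (ds.map (fun d => if bs.contains (t.1 + d.1, t.2 + d.2) then (1 : Int) else 0)).sum by
    simpa using h (PySem.Dict.values dm) 0
  intro ds
  induction ds with
  | nil => simp
  | cons d ds ih =>
    intro a
    simp only [List.foldl_cons, List.map_cons, List.sum_cons, ih]
    by_cases h : bs.contains (t.1 + d.1, t.2 + d.2) = true
    · rw [if_pos h, if_pos h]
      ring
    · rw [if_neg h, if_neg h]
      ring

-- B's tallied count of a tile t IS A's neighbour count at t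
theorem pvCounts_eq_adj (black_tiles : List (Int × Int)) (dmap : List (String × Int × Int)) (t : Int × Int) :
    (((PySem.Set.ofList black_tiles).flatMap (fun b =>
        (PySem.Dict.values (PySem.Dict.ofList dmap)).map (fun d => (b.1 - d.1, b.2 - d.2)))).foldl
      (fun c key => c.modify key 0 (· + 1)) PySem.Dict.empty).getD t 0
      = count_adjacent_black_tiles black_tiles t (PySem.Dict.ofList dmap) := by
  rw [PySem.Dict.getD_foldl_modify_add_one, PySem.Dict.getD_empty, zero_add]
  have hcount : ((PySem.Set.ofList black_tiles).flatMap (fun b =>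
        (PySem.Dict.values (PySem.Dict.ofList dmap)).map (fun d => (b.1 - d.1, b.2 - d.2)))).count t
      = ((PySem.Set.ofList black_tiles).map (fun b =>
          (PySem.Dict.values (PySem.Dict.ofList dmap)).countP
            (fun d => decide ((b.1 - d.1, b.2 - d.2) = t)))).sum := by
    rw [List.count_flatMap]
    apply congrArg List.sum
    apply List.map_congr_left
    intro b _
    simp only [Function.comp_apply]
    rw [List.count_eq_countP, List.countP_map]
    apply List.countP_congr
    intro d _
    simp
  rw [hcount, pvSwap]
  have hmem : ((PySem.Dict.values (PySem.Dict.ofList dmap)).map (fun d =>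
        (PySem.Set.ofList black_tiles).countP (fun b => decide ((b.1 - d.1, b.2 - d.2) = t)))).sum
      = ((PySem.Dict.values (PySem.Dict.ofList dmap)).map (fun d =>
          if black_tiles.contains (t.1 + d.1, t.2 + d.2) then (1 : Nat) else 0)).sum := by
    apply congrArg List.sum
    apply List.map_congr_left
    intro d _
    rw [pvCount_mem (PySem.Set.ofList black_tiles) (PySem.Set.nodup_ofList black_tiles) d t,
      pvContains_ofList black_tiles (t.1 + d.1, t.2 + d.2)]
  rw [hmem, pvCastSum _ (fun d => black_tiles.contains (t.1 + d.1, t.2 + d.2)),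
    pvCountAdj_eq_sum black_tiles t (PySem.Dict.ofList dmap)]

-- a nested range loop is a loop over the flattened cell list
theorem pvNested_foldl {β : Type} (outer inner : List Int) (g : β → Int × Int → β) (init : β) :
    outer.foldl (fun acc ne => inner.foldl (fun acc se => g acc (ne, se)) acc) init
      = (outer.flatMap (fun ne => inner.map (fun se => (ne, se)))).foldl g init := by
  rw [List.foldl_flatMap]
  have hstep : (fun (acc : β) (ne : Int) => (inner.map (fun se => (ne, se))).foldl g acc)
      = fun acc ne => inner.foldl (fun acc se => g acc (ne, se)) acc := by
    funext acc ne
    rw [List.foldl_map]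
  rw [hstep]

-- folding guarded Set.add over fresh distinct elements is a filter
theorem pvFold_add_filter (p : Int × Int → Bool) (cells : List (Int × Int)) (acc : List (Int × Int))
    (hnd : cells.Nodup) (hfresh : ∀ t ∈ cells, t ∉ acc) :
    cells.foldl (fun acc t => if p t then PySem.Set.add acc t else acc) acc
      = acc ++ cells.filter p := by
  induction cells generalizing acc with
  | nil => simp
  | cons c cells ih =>
    have hc : c ∉ acc := hfresh c List.mem_cons_self
    have hnd' : cells.Nodup := hnd.of_cons
    have hcnot : c ∉ cells := (List.nodup_cons.mp hnd).1
    simp only [List.foldl_cons, List.filter_cons]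
    by_cases hp : p c
    · rw [if_pos hp, if_pos hp]
      have hadd : PySem.Set.add acc c = acc ++ [c] := by
        simp [PySem.Set.add, hc]
      rw [hadd, ih (acc ++ [c]) hnd' ?_, List.append_assoc]
      · rfl
      · intro t ht
        have hne : t ≠ c := fun h => hcnot (h ▸ ht)
        have := hfresh t (List.mem_cons_of_mem c ht)
        simp_all
    · rw [if_neg (by simp [hp]), if_neg (by simp [hp])]
      exact ih acc hnd' (fun t ht => hfresh t (List.mem_cons_of_mem c ht))

-- ===== VERDICT (by name: the statement is the Claim_ definition above) =====
theorem get_next_black_tiles_spec : Claim_equal_get_next_black_tiles := by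
  intro black_tiles min_ne max_ne min_se max_se dmap _hdom
  unfold Spec_get_next_black_tiles get_next_black_tiles get_next_black_tiles_alt
  simp only []
  congr 1
  have hcellsnd : ((PySem.List.pyRange (min_ne - 1) (max_ne + 2) 1).flatMap (fun ne =>
      (PySem.List.pyRange (min_se - 1) (max_se + 2) 1).map (fun se => (ne, se)))).Nodup :=
    List.Nodup.product (PySem.List.nodup_pyRange_one _ _) (PySem.List.nodup_pyRange_one _ _)
  -- A's nested fold is a filter of the flattened cells by A's survival predicate
  have hA : (PySem.List.pyRange (min_ne - 1) (max_ne + 2) 1).foldl (fun acc ne =>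
      (PySem.List.pyRange (min_se - 1) (max_se + 2) 1).foldl (fun acc se =>
        let tile : Int × Int := (ne, se)
        let adjacent := count_adjacent_black_tiles black_tiles tile (PySem.Dict.ofList dmap)
        if black_tiles.contains tile then
          if 1 ≤ adjacent ∧ adjacent ≤ 2 then PySem.Set.add acc tile else acc
        else
          if adjacent = 2 then PySem.Set.add acc tile else acc) acc) PySem.Set.empty
      = ((PySem.List.pyRange (min_ne - 1) (max_ne + 2) 1).flatMap (fun ne =>
          (PySem.List.pyRange (min_se - 1) (max_se + 2) 1).map (fun se => (ne, se)))).filter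
        (fun t =>
          if black_tiles.contains t then
            decide (1 ≤ count_adjacent_black_tiles black_tiles t (PySem.Dict.ofList dmap)
              ∧ count_adjacent_black_tiles black_tiles t (PySem.Dict.ofList dmap) ≤ 2)
          else decide (count_adjacent_black_tiles black_tiles t (PySem.Dict.ofList dmap) = 2)) := by
    rw [pvNested_foldl (PySem.List.pyRange (min_ne - 1) (max_ne + 2) 1)
      (PySem.List.pyRange (min_se - 1) (max_se + 2) 1)
      (fun acc t =>
        if black_tiles.contains t then
          if 1 ≤ count_adjacent_black_tiles black_tiles t (PySem.Dict.ofList dmap)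
            ∧ count_adjacent_black_tiles black_tiles t (PySem.Dict.ofList dmap) ≤ 2
          then PySem.Set.add acc t else acc
        else if count_adjacent_black_tiles black_tiles t (PySem.Dict.ofList dmap) = 2
          then PySem.Set.add acc t else acc)
      PySem.Set.empty]
    have hstep : (fun (acc : List (Int × Int)) (t : Int × Int) =>
        if black_tiles.contains t then
          if 1 ≤ count_adjacent_black_tiles black_tiles t (PySem.Dict.ofList dmap)
            ∧ count_adjacent_black_tiles black_tiles t (PySem.Dict.ofList dmap) ≤ 2
          then PySem.Set.add acc t else acc
        else if count_adjacent_black_tiles black_tiles t (PySem.Dict.ofList dmap) = 2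
          then PySem.Set.add acc t else acc)
        = fun acc t =>
          if (if black_tiles.contains t then
              decide (1 ≤ count_adjacent_black_tiles black_tiles t (PySem.Dict.ofList dmap)
                ∧ count_adjacent_black_tiles black_tiles t (PySem.Dict.ofList dmap) ≤ 2)
            else decide (count_adjacent_black_tiles black_tiles t (PySem.Dict.ofList dmap) = 2))
          then PySem.Set.add acc t else acc := by
      funext acc t
      by_cases hm : black_tiles.contains t
      · simp only [hm, if_true]
        by_cases h1 : 1 ≤ count_adjacent_black_tiles black_tiles t (PySem.Dict.ofList dmap)
            ∧ count_adjacent_black_tiles black_tiles t (PySem.Dict.ofList dmap) ≤ 2 <;>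
          simp [h1]
      · simp only [Bool.not_eq_true] at hm
        simp only [hm, Bool.false_eq_true, if_false]
        by_cases h2 : count_adjacent_black_tiles black_tiles t (PySem.Dict.ofList dmap) = 2 <;>
          simp [h2]
    rw [hstep, pvFold_add_filter _ _ PySem.Set.empty hcellsnd (by intro t _ h; cases h)]
    rfl
  rw [hA]
  refine (List.filter_congr ?_).trans
    (PySem.Set.ofList_eq_self_of_nodup _ (List.Nodup.filter _ hcellsnd)).symm
  intro t _
  symm
  simp only [PySem.Set.contains_eq_listContains]
  rw [pvCounts_eq_adj black_tiles dmap t, pvContains_ofList]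
  have hnn : 0 ≤ count_adjacent_black_tiles black_tiles t (PySem.Dict.ofList dmap) := by
    rw [← pvCounts_eq_adj black_tiles dmap t,
      PySem.Dict.getD_foldl_modify_add_one, PySem.Dict.getD_empty, zero_add]
    positivity
  by_cases hm : black_tiles.contains t
  · simp only [hm, if_true, Bool.and_true]
    rw [Bool.eq_iff_iff]
    simp only [Bool.or_eq_true, beq_iff_eq, decide_eq_true_iff]
    omega
  · simp only [Bool.not_eq_true] at hm
    simp only [hm, Bool.false_eq_true, if_false, Bool.and_false, Bool.or_false]
    rw [Bool.eq_iff_iff]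
    simp only [beq_iff_eq, decide_eq_true_iff]
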